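-- pv_equiv track=rewrite | github.com/KassieAkut/PythonAssignmnet | assignment.py | generate_score
-- ===== SOURCE A (Python) =====
-- def scores(letter, position, words_split):
--     first_score_positions = {'first': 0, 'last': 5}
--     remaining_score_position = {'Q': 1, 'Z': 1, 'J': 3, 'X': 3, 'K': 6, 'F': 7, 'H': 7, 'V': 7, 'W': 7, 'Y': 7,
--                      'B': 8, 'C': 8, 'M': 8, 'P': 8, 'D': 9, 'G': 9, 'L': 15, 'N': 15, 'R': 15, 'S': 15, 'T': 15,
--                      'O': 20, 'U': 20, 'A': 25, 'I': 25, 'E': 35}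
--
--     if position == 'first':
--         return first_score_positions[position]
--     elif position == 'last':
--         return 20 if letter == 'E' else 5
--     else:
-- # If position is neither first nor last, calculate score based on position and letter
--         first_score_positions = 1 if position == 'second' else 2
--         remaining_score_position = remaining_score_position.get(letter, 0)
--         return first_score_positions + remaining_score_position
--
-- def generate_score(first_letter, remaining_letters, words_split):
--     abbreviation = first_letter
--     score = 0
--
--     for i, letter in enumerate(remaining_letters, start=1):
-- # Determining the position of the letter in the abbreviation
--         position = 'first' if i == 1 else 'last' if i == len(remaining_letters) else 'third'
--         letter_score = scores(letter, position, words_split)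
--         score += letter_score
--         abbreviation += letter
--
--     return abbreviation, score
-- ===== SOURCE B (Python) =====
-- _TABLE = {'Q': 1, 'Z': 1, 'J': 3, 'X': 3, 'K': 6, 'F': 7, 'H': 7, 'V': 7, 'W': 7, 'Y': 7,
--           'B': 8, 'C': 8, 'M': 8, 'P': 8, 'D': 9, 'G': 9, 'L': 15, 'N': 15, 'R': 15, 'S': 15, 'T': 15,
--           'O': 20, 'U': 20, 'A': 25, 'I': 25, 'E': 35}
--
--
-- def generate_score(first_letter, remaining_letters, words_split):
--     abbreviation = first_letter + ''.join(remaining_letters)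
--     score = 0
--     if len(remaining_letters) >= 2:
--         # last letter contributes 20 for 'E', otherwise 5; the first contributes 0
--         score += 20 if remaining_letters[-1] == 'E' else 5
--         # each interior letter contributes 2 plus its table value
--         score += sum(2 + _TABLE.get(c, 0) for c in remaining_letters[1:-1])
--     return abbreviation, score
-- ===== Notes on version B (the rewrite author's own statement) =====
-- stated objective: simpler
-- what changed: Replaces the enumerate loop with its per-letter three-way position dispatch through the scores() helper (which rebuilds two dict literals on every call, and has a dead 'second' branch) by a direct join for the abbreviation and a piecewise score: 0 for the first letter, a guarded last-letter term, and a sum over the interior slice with one module-level table.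
import Mathlib
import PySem

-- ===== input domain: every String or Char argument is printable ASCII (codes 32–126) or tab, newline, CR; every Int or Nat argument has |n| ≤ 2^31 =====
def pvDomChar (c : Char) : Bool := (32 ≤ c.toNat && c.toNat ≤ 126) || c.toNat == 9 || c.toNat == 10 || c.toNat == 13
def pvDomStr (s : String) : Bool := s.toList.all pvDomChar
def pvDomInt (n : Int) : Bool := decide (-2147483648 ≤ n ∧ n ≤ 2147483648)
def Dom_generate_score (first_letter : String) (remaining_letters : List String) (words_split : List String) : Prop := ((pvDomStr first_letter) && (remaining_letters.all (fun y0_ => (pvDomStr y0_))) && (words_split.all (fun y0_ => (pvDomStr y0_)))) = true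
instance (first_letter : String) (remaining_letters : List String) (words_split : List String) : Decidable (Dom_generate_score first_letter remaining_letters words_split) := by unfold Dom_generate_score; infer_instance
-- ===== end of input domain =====

-- B replaces A's enumerate loop + three-way scores() dispatch by a direct join and a
-- piecewise score (guarded last-letter term plus a sum over the interior slice): simpler.

-- ===== PORT A =====
def pvScoresA (letter : String) (position : String) (words_split : List String) : Int :=
  let first_score_positions : PySem.Dict String Int := PySem.Dict.ofList [("first", 0), ("last", 5)]
  let remaining_score_position : PySem.Dict String Int := PySem.Dict.ofList
    [("Q",1),("Z",1),("J",3),("X",3),("K",6),("F",7),("H",7),("V",7),("W",7),("Y",7),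
     ("B",8),("C",8),("M",8),("P",8),("D",9),("G",9),("L",15),("N",15),("R",15),("S",15),("T",15),
     ("O",20),("U",20),("A",25),("I",25),("E",35)]
  if position = "first" then
    -- first_score_positions[position]: key "first" is present, so the lookup cannot raise
    (PySem.Dict.get? first_score_positions position).getD 0
  else if position = "last" then
    (if letter = "E" then 20 else 5)
  else
    let fsp : Int := if position = "second" then 1 else 2
    let rsp : Int := PySem.Dict.getD remaining_score_position letter 0
    fsp + rsp

def generate_score (first_letter : String) (remaining_letters : List String) (words_split : List String) : String × Int :=
  let n : Int := remaining_letters.length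
  (PySem.List.enumerate remaining_letters 1).foldl
    (fun (st : String × Int) (p : Int × String) =>
      let position := if p.1 = 1 then "first" else if p.1 = n then "last" else "third"
      let letter_score := pvScoresA p.2 position words_split
      (st.1 ++ p.2, st.2 + letter_score))
    (first_letter, 0)

-- ===== PORT B =====
def pvTableB : PySem.Dict String Int := PySem.Dict.ofList
  [("Q",1),("Z",1),("J",3),("X",3),("K",6),("F",7),("H",7),("V",7),("W",7),("Y",7),
   ("B",8),("C",8),("M",8),("P",8),("D",9),("G",9),("L",15),("N",15),("R",15),("S",15),("T",15),
   ("O",20),("U",20),("A",25),("I",25),("E",35)]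

def generate_score_alt (first_letter : String) (remaining_letters : List String) (words_split : List String) : String × Int :=
  let abbreviation := first_letter ++ PySem.Str.join "" remaining_letters
  let score : Int :=
    if 2 ≤ remaining_letters.length then
      (if (PySem.List.pyGet? remaining_letters (-1)).getD "" = "E" then 20 else 5)
      + ((PySem.List.slice remaining_letters (some 1) (some (-1))).map
          (fun c => 2 + PySem.Dict.getD pvTableB c 0)).sum
    else 0
  (abbreviation, score)

-- ===== PRECONDITION & SPEC =====
def Spec_generate_score (first_letter : String) (remaining_letters : List String) (words_split : List String) (out : String × Int) : Prop := out = generate_score_alt first_letter remaining_letters words_split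
instance (first_letter : String) (remaining_letters : List String) (words_split : List String) (out : String × Int) : Decidable (Spec_generate_score first_letter remaining_letters words_split out) := by unfold Spec_generate_score; infer_instance

-- ===== CLAIM (what is proved, stated in full; the proofs are below) =====
def Claim_equal_generate_score : Prop := ∀ (first_letter : String) (remaining_letters : List String) (words_split : List String), Dom_generate_score first_letter remaining_letters words_split → Spec_generate_score first_letter remaining_letters words_split (generate_score first_letter remaining_letters words_split)

-- ===== LEMMAS AND PROOFS =====

-- "".join distributes over cons (B's join vs A's step-by-step concatenation)
theorem pvJoinCons (x : String) (xs : List String) :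
    PySem.Str.join "" (x :: xs) = x ++ PySem.Str.join "" xs := by
  apply String.toList_injective
  cases xs with
  | nil => simp [PySem.Str.join, PySem.Chars.join_singleton]
  | cons b l => simp [PySem.Str.join, PySem.Chars.join_cons_cons]

-- B's interior slice xs[1:-1] on a list with at least two elements
theorem pvSliceMid (x : String) (w : String) (ws' : List String) :
    PySem.List.slice (x :: w :: ws') (some 1) (some (-1)) = (w :: ws').dropLast := by
  simp [PySem.List.slice]
  rw [List.dropLast_eq_take]
  simp

-- A's scores() on the three positions the loop can produce
theorem pvScoresFirst (x : String) (ws : List String) : pvScoresA x "first" ws = 0 := by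
  simp [pvScoresA]; decide

theorem pvScoresLast (z : String) (ws : List String) :
    pvScoresA z "last" ws = (if z = "E" then 20 else 5) := by
  simp [pvScoresA]

theorem pvScoresThird (z : String) (ws : List String) :
    pvScoresA z "third" ws = 2 + PySem.Dict.getD pvTableB z 0 := by
  simp [pvScoresA, pvTableB]

-- A's loop on the tail (indices ≥ 2): every element but the last is "third", the last is "last".
theorem pvLoopA (ws : List String) (n : Int) (ys : List String) :
    ys ≠ [] → ∀ (k : Int) (s : String) (sc : Int), 2 ≤ k → k + ys.length - 1 = n →
    (PySem.List.enumerate ys k).foldl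
      (fun (st : String × Int) (p : Int × String) =>
        (st.1 ++ p.2,
         st.2 + pvScoresA p.2 (if p.1 = 1 then "first" else if p.1 = n then "last" else "third") ws))
      (s, sc)
    = (s ++ PySem.Str.join "" ys,
       sc + ((ys.dropLast).map (fun c => 2 + PySem.Dict.getD pvTableB c 0)).sum
          + (if ys.getLast? = some "E" then 20 else 5)) := by
  induction ys with
  | nil => intro h; exact absurd rfl h
  | cons z zs ih =>
    intro _ k s sc hk hn
    cases zs with
    | nil =>
      have hkn : k = n := by simp at hn; omega
      have hn1 : ¬ (n = 1) := by omega
      simp only [PySem.List.enumerate_cons, PySem.List.enumerate_nil, List.foldl_cons,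
                 List.foldl_nil, hkn, hn1, if_false]
      rw [pvJoinCons]
      simp [PySem.Str.join, PySem.Chars.join_nil]
      exact pvScoresLast z ws
    | cons w ws' =>
      have hk1 : ¬ (k = 1) := by omega
      have hkn : ¬ (k = n) := by simp at hn ⊢; omega
      rw [PySem.List.enumerate_cons, List.foldl_cons]
      simp only [hk1, hkn, if_false, pvScoresThird]
      rw [ih (by simp) (k + 1) _ _ (by omega) (by simp at hn ⊢; omega)]
      refine Prod.ext ?_ ?_
      · simp only [pvJoinCons, String.append_assoc]
      · simp only [List.dropLast_cons_of_ne_nil (by simp : w :: ws' ≠ ([] : List String)),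
                   List.map_cons, List.sum_cons, List.getLast?_cons_cons]
        ring

-- ===== VERDICT (by name: the statement is the Claim_ definition above) =====
theorem generate_score_spec : Claim_equal_generate_score := by
  intro fl rl ws _
  unfold Spec_generate_score
  match rl with
  | [] =>
    simp [generate_score, generate_score_alt, PySem.List.enumerate_nil, PySem.Str.join,
          PySem.Chars.join_nil]
  | [x] =>
    simp [generate_score, generate_score_alt, PySem.List.enumerate_cons,
          PySem.List.enumerate_nil, pvScoresFirst, PySem.Str.join]
  | x :: w :: ws' =>
    unfold generate_score
    rw [PySem.List.enumerate_cons, List.foldl_cons]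
    simp only [List.length_cons, pvScoresFirst, zero_add, reduceIte, Int.reduceAdd]
    refine Eq.trans (pvLoopA ws ((ws'.length + 1 + 1 : Nat) : Int) (w :: ws') (by simp) 2
          (fl ++ x) 0 (by omega) (by push_cast; simp; omega)) ?_
    unfold generate_score_alt
    have hlen : 2 ≤ (x :: w :: ws').length := by simp
    have hlast : PySem.List.pyGet? (x :: w :: ws') (-1) = some ((x :: w :: ws').getLast (by simp)) := by
      simp [PySem.List.pyGet?_neg_one, List.getLast?_eq_some_getLast]
    refine Prod.ext ?_ ?_
    · simp only [pvJoinCons, String.append_assoc]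
    · simp only [if_pos hlen, hlast, pvSliceMid, Option.getD_some]
      have hgl : (x :: w :: ws').getLast (by simp) = (w :: ws').getLast (by simp) := by
        simp [List.getLast_cons]
      rw [hgl]
      have hgl2 : (w :: ws').getLast? = some ((w :: ws').getLast (by simp)) := by
        simp [List.getLast?_eq_some_getLast]
      rw [hgl2]
      simp only [Option.some.injEq]
      ring
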